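-- pv_equiv track=rewrite | github.com/sarah9db/MealMap | agents/shopping_agent.py | _distance_for_store
-- ===== SOURCE A (Python) =====
-- def _distance_for_store(store: str, stores_with_dist: list[dict]) -> str:
--     for s in stores_with_dist:
--         name = str(s.get("name", ""))
--         if name.lower() == store.lower():
--             return f"{s.get('distance_km')} km"
--     for s in stores_with_dist:
--         name = str(s.get("name", ""))
--         if name.lower() in store.lower() or store.lower() in name.lower():
--             return f"{s.get('distance_km')} km"
--     return "—"
-- ===== SOURCE B (Python) =====
-- def _distance_for_store(store: str, stores_with_dist: list[dict]) -> str: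
--     target = store.lower()
--     fallback = None
--     for s in stores_with_dist:
--         name = str(s.get("name", "")).lower()
--         if name == target:
--             return f"{s.get('distance_km')} km"
--         if fallback is None and (name in target or target in name):
--             fallback = f"{s.get('distance_km')} km"
--     return fallback if fallback is not None else "—"
-- ===== Notes on version B (the rewrite author's own statement) =====
-- stated objective: simpler
-- what changed: A's two sequential full passes (exact-match scan, then substring-match scan) are merged into a single loop that returns immediately on an exact match and carries the first substring match as an optional fallback, and store.lower() is hoisted out of the loop instead of being recomputed per element.
import Mathlib
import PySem

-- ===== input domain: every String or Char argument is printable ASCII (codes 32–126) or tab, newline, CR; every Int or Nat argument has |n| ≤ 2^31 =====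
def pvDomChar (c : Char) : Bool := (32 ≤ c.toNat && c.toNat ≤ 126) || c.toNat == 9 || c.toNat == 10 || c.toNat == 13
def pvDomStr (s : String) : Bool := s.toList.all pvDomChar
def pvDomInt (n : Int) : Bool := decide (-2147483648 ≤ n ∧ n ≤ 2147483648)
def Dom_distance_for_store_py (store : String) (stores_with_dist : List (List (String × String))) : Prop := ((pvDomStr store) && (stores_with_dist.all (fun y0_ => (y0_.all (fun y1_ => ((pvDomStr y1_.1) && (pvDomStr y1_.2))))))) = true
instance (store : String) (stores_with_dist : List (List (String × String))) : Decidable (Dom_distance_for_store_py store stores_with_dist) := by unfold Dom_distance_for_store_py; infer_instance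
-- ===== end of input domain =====

-- B merges A's two sequential passes into ONE loop carrying an optional first-substring fallback
-- (objective: simpler/one-pass); return value only, no side effects in either version.

-- ===== PORT A =====
-- f"{s.get('distance_km')} km": a missing key formats None as "None"
def pvDistStr (s : List (String × String)) : String :=
  match (PySem.Dict.mk s).get? "distance_km" with
  | none => "None km"
  | some v => v ++ " km"

-- first for-loop of A: exact (case-insensitive) name match
def pvA_loop1 (store : String) : List (List (String × String)) → Option String
  | [] => none
  | s :: rest =>
    let name := (PySem.Dict.mk s).getD "name" ""
    if PySem.Str.lower name == PySem.Str.lower store then some (pvDistStr s)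
    else pvA_loop1 store rest

-- second for-loop of A: substring match either way
def pvA_loop2 (store : String) : List (List (String × String)) → Option String
  | [] => none
  | s :: rest =>
    let name := (PySem.Dict.mk s).getD "name" ""
    if PySem.Str.isIn (PySem.Str.lower name) (PySem.Str.lower store)
       || PySem.Str.isIn (PySem.Str.lower store) (PySem.Str.lower name) then some (pvDistStr s)
    else pvA_loop2 store rest

def distance_for_store_py (store : String) (stores_with_dist : List (List (String × String))) : String :=
  match pvA_loop1 store stores_with_dist with
  | some d => d
  | none =>
    match pvA_loop2 store stores_with_dist with
    | some d => d
    | none => "—"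

-- ===== PORT B =====
-- single pass carrying the first-substring-match fallback
def pvB_loop (target : String) (fb : Option String) : List (List (String × String)) → String
  | [] => match fb with | some f => f | none => "—"
  | s :: rest =>
    let name := PySem.Str.lower ((PySem.Dict.mk s).getD "name" "")
    if name == target then pvDistStr s
    else
      pvB_loop target
        (if fb.isNone && (PySem.Str.isIn name target || PySem.Str.isIn target name)
         then some (pvDistStr s) else fb) rest

def distance_for_store_py_alt (store : String) (stores_with_dist : List (List (String × String))) : String :=
  pvB_loop (PySem.Str.lower store) none stores_with_dist

-- ===== PRECONDITION & SPEC =====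
def Spec_distance_for_store_py (store : String) (stores_with_dist : List (List (String × String))) (out : String) : Prop := out = distance_for_store_py_alt store stores_with_dist
instance (store : String) (stores_with_dist : List (List (String × String))) (out : String) : Decidable (Spec_distance_for_store_py store stores_with_dist out) := by unfold Spec_distance_for_store_py; infer_instance

-- ===== CLAIM (what is proved, stated in full; the proofs are below) =====
def Claim_equal_distance_for_store_py : Prop := ∀ (store : String) (stores_with_dist : List (List (String × String))), Dom_distance_for_store_py store stores_with_dist → Spec_distance_for_store_py store stores_with_dist (distance_for_store_py store stores_with_dist)

-- ===== LEMMAS AND PROOFS =====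
-- invariant of B's single pass: exact match in the rest wins, else the carried fallback, else
-- the first substring match in the rest, else "—"
theorem pvB_loop_eq (store : String) (l : List (List (String × String))) (fb : Option String) :
    pvB_loop (PySem.Str.lower store) fb l =
      match pvA_loop1 store l with
      | some d => d
      | none =>
        match fb with
        | some f => f
        | none => match pvA_loop2 store l with | some d => d | none => "—" := by
  induction l generalizing fb with
  | nil => cases fb <;> simp [pvB_loop, pvA_loop1, pvA_loop2]
  | cons s rest ih =>
    simp only [pvB_loop, pvA_loop1, pvA_loop2]
    by_cases hx : (PySem.Str.lower ((PySem.Dict.mk s).getD "name" "") == PySem.Str.lower store) = true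
    · simp [hx]
    · simp only [hx, if_false, Bool.false_eq_true]
      rw [ih]
      cases fb with
      | some f => simp
      | none =>
        by_cases hs : PySem.Chars.isIn (PySem.Chars.lower ((PySem.Dict.mk s).getD "name" "").toList)
              (PySem.Chars.lower store.toList) = true
            ∨ PySem.Chars.isIn (PySem.Chars.lower store.toList)
              (PySem.Chars.lower ((PySem.Dict.mk s).getD "name" "").toList) = true
        · simp [hs]
        · simp [hs]

-- ===== VERDICT (by name: the statement is the Claim_ definition above) =====
theorem distance_for_store_py_spec : Claim_equal_distance_for_store_py := by
  intro store l _
  unfold Spec_distance_for_store_py distance_for_store_py distance_for_store_py_alt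
  rw [pvB_loop_eq]
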